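-- pv_equiv track=rewrite | github.com/damianoazzolini/pasta | pasta/lifted/lifted_utilities.py | generate_admissible_weak_compositions
-- ===== SOURCE A (Python) =====
-- def weak_compositions(boxes: int, balls: int, parent: 'tuple[int,...]' = tuple()):
--     '''
--     Generate weak compositions.
--     From
--     https://stackoverflow.com/questions/4647120/next-composition-of-n-into-k-parts-does-anyone-have-a-working-algorithm
--     '''
--     if boxes > 1:
--         for i in range(balls + 1):
--             for x in weak_compositions(boxes - 1, i, parent + (balls - i,)):
--                 yield x
--     else:
--         yield parent + (balls,)
--
-- def is_admissible(e: 'tuple[int]', constr: 'list[int]'):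
--     '''
--     Checks that every int is less than the imposed constraint
--     on cardinality. Used in generate_admissible_weak_compositions
--     '''
--     for el, n in zip(list(e), constr):
--         if el > n:
--             return False
--     return True
--
-- def paired_query_constraint(world: str) -> bool:
--     '''
--     Supposing that the query is c(1), returns true if a(1)
--     and at least one b(1,_) is true. These two elements are
--     at the positions 0 and len(world) / 2
--     '''
--     return int(world[0]) > 0 and int(world[int(len(world)/2)]) > 0
--
-- def generate_admissible_weak_compositions(max_vars_per_clusters: 'list[int]', n_tot_vars: int, pair_constraint: bool = False):
--     '''
--     Generate admissible weak compositions where admissibility is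
--     defined by max_vars_per_cluster
--     '''
--     r: 'list[tuple[int,...]]' = []
--     for el in weak_compositions(len(max_vars_per_clusters), n_tot_vars):
--         if not pair_constraint:
--             if is_admissible(el, max_vars_per_clusters):
--                 r.append(el)
--         else:
--             if is_admissible(el, max_vars_per_clusters) and paired_query_constraint(el):
--                 r.append(el)
--     return r
-- ===== SOURCE B (Python) =====
-- def generate_admissible_weak_compositions(max_vars_per_clusters: 'list[int]', n_tot_vars: int, pair_constraint: bool = False):
--     '''
--     Generate admissible weak compositions directly: each cluster is only
--     assigned values within its cap, so inadmissible compositions are never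
--     enumerated at all.
--     '''
--     def gen(caps, rem):
--         if len(caps) == 1:
--             return [(rem,)] if rem <= caps[0] else []
--         cap = caps[0]
--         rest = caps[1:]
--         out = []
--         v = rem if rem <= cap else cap
--         while v >= 0:
--             for tail in gen(rest, rem - v):
--                 out.append((v,) + tail)
--             v -= 1
--         return out
--     comps = gen(max_vars_per_clusters, n_tot_vars)
--     if pair_constraint:
--         half = len(max_vars_per_clusters) // 2
--         comps = [t for t in comps if t[0] > 0 and t[half] > 0]
--     return comps
-- ===== Notes on version B (the rewrite author's own statement) =====
-- stated objective: faster
-- what changed: Instead of generating all C(n+k-1,k-1) weak compositions and filtering by the caps, B recurses over the cap list assigning each cluster only values within its cap (and within the remaining total), so only admissible compositions are ever produced; the pair constraint is applied as a final filter.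
-- outside the precondition, e.g. on generate_admissible_weak_compositions([], 0, False): A returns [(0,)], B raises IndexError
import Mathlib
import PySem

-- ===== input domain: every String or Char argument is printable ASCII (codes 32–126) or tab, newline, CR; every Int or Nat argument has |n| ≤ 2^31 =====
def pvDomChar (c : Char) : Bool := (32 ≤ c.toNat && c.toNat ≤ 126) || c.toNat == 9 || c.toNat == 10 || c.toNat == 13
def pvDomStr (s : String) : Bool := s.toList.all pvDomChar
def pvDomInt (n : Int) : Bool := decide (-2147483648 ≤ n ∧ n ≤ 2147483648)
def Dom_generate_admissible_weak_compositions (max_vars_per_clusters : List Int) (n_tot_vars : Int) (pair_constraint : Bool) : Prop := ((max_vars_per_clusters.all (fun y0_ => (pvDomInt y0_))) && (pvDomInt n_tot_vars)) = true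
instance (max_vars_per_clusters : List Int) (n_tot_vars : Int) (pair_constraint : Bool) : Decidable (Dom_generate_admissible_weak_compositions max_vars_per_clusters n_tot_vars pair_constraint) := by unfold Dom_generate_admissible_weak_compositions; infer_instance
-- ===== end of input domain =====

-- B generates only admissible compositions by capping each cluster's value during the
-- recursion (instead of enumerating every weak composition and filtering); faster.

-- ===== PORT A =====
-- weak_compositions: the generator's yields, collected in order (flatMap = nested yields).
def weak_compositions (boxes : Int) (balls : Int) (parent : List Int) : List (List Int) :=
  if boxes > 1 then
    (PySem.List.pyRange 0 (balls + 1) 1).flatMap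
      (fun i => weak_compositions (boxes - 1) i (parent ++ [balls - i]))
  else [parent ++ [balls]]
termination_by boxes.toNat
decreasing_by omega

-- the for-loop of is_admissible over zip(e, constr), with its early return
def is_admissible_loop : List (Int × Int) → Bool
  | [] => true
  | (el, n) :: rest => if el > n then false else is_admissible_loop rest

def is_admissible (e : List Int) (constr : List Int) : Bool :=
  is_admissible_loop (e.zip constr)

-- int(world[0]) is the identity on ints; int(len(world)/2) = len(world) // 2 (len ≥ 0).
-- The `none` branch is Python's IndexError (empty world); unreachable under Pre_.
def paired_query_constraint (world : List Int) : Bool :=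
  match PySem.List.pyGet? world 0,
        PySem.List.pyGet? world ((world.length / 2 : Nat) : Int) with
  | some a, some b => decide (a > 0) && decide (b > 0)
  | _, _ => false

def generate_admissible_weak_compositions (max_vars_per_clusters : List Int) (n_tot_vars : Int) (pair_constraint : Bool) : List (List Int) :=
  (weak_compositions (max_vars_per_clusters.length : Int) n_tot_vars []).foldl
    (fun r el =>
      if !pair_constraint then
        (if is_admissible el max_vars_per_clusters then r ++ [el] else r)
      else
        (if is_admissible el max_vars_per_clusters && paired_query_constraint el then r ++ [el] else r))
    []

-- ===== PORT B =====
-- the while loop's sequence of v values: m, m-1, ..., 0 (empty if m < 0)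
def pvDown (m : Int) : List Int :=
  if h : m < 0 then [] else m :: pvDown (m - 1)
termination_by (m + 1).toNat
decreasing_by omega

-- gen(caps, rem) of Source B; [] case is Python's IndexError (caps[0] on []); unreachable under Pre_.
def genAdm : List Int → Int → List (List Int)
  | [], _ => []
  | [c], rem => if rem ≤ c then [[rem]] else []
  | c :: c2 :: rs, rem =>
      (pvDown (if rem ≤ c then rem else c)).foldl
        (fun out v => out ++ (genAdm (c2 :: rs) (rem - v)).map (fun t => v :: t)) []

-- the pair-constraint test of Source B with precomputed half
def pairedAltTest (half : Int) (t : List Int) : Bool :=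
  match PySem.List.pyGet? t 0, PySem.List.pyGet? t half with
  | some a, some b => decide (a > 0) && decide (b > 0)
  | _, _ => false

def generate_admissible_weak_compositions_alt (max_vars_per_clusters : List Int) (n_tot_vars : Int) (pair_constraint : Bool) : List (List Int) :=
  let comps := genAdm max_vars_per_clusters n_tot_vars
  if pair_constraint then
    comps.filter (fun t => pairedAltTest ((max_vars_per_clusters.length / 2 : Nat) : Int) t)
  else comps

-- ===== PRECONDITION & SPEC =====
-- Pre_ excludes only the empty cluster list, on which A's weak_compositions degenerately
-- yields a 1-tuple (n,) for zero boxes (an artefact of its base case) while B's recursion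
-- raises IndexError there.
def Pre_generate_admissible_weak_compositions (max_vars_per_clusters : List Int) (n_tot_vars : Int) (pair_constraint : Bool) : Prop :=
  max_vars_per_clusters ≠ []
instance (max_vars_per_clusters : List Int) (n_tot_vars : Int) (pair_constraint : Bool) : Decidable (Pre_generate_admissible_weak_compositions max_vars_per_clusters n_tot_vars pair_constraint) := by unfold Pre_generate_admissible_weak_compositions; infer_instance

def pvWitness_generate_admissible_weak_compositions : List Int × Int × Bool := ([1, 2], 2, false)

def Spec_generate_admissible_weak_compositions (max_vars_per_clusters : List Int) (n_tot_vars : Int) (pair_constraint : Bool) (out : List (List Int)) : Prop := out = generate_admissible_weak_compositions_alt max_vars_per_clusters n_tot_vars pair_constraint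
instance (max_vars_per_clusters : List Int) (n_tot_vars : Int) (pair_constraint : Bool) (out : List (List Int)) : Decidable (Spec_generate_admissible_weak_compositions max_vars_per_clusters n_tot_vars pair_constraint out) := by unfold Spec_generate_admissible_weak_compositions; infer_instance

-- ===== CLAIM (what is proved, stated in full; the proofs are below) =====
def Claim_equal_generate_admissible_weak_compositions : Prop := ∀ (max_vars_per_clusters : List Int) (n_tot_vars : Int) (pair_constraint : Bool), Dom_generate_admissible_weak_compositions max_vars_per_clusters n_tot_vars pair_constraint → Pre_generate_admissible_weak_compositions max_vars_per_clusters n_tot_vars pair_constraint → Spec_generate_admissible_weak_compositions max_vars_per_clusters n_tot_vars pair_constraint (generate_admissible_weak_compositions max_vars_per_clusters n_tot_vars pair_constraint)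

-- ===== LEMMAS AND PROOFS =====

-- the parent accumulator just prefixes every yielded tuple
theorem wc_parent_aux : ∀ (k : Nat) (b : Int), b.toNat ≤ k → ∀ (n : Int) (p : List Int),
    weak_compositions b n p = (weak_compositions b n []).map (fun t => p ++ t) := by
  intro k
  induction k with
  | zero =>
    intro b hb n p
    rw [weak_compositions, weak_compositions]
    have hb1 : ¬ b > 1 := by omega
    simp [hb1]
  | succ k ih =>
    intro b hb n p
    rw [weak_compositions, weak_compositions]
    by_cases h : b > 1
    · simp only [h, if_pos, List.map_flatMap]
      refine List.flatMap_congr (fun i _ => ?_)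
      have h1 := ih (b - 1) (by omega) i (p ++ [n - i])
      have h2 := ih (b - 1) (by omega) i ([] ++ [n - i])
      rw [h1, h2]
      simp [Function.comp, List.append_assoc]
    · simp [h]

theorem wc_parent (b n : Int) (p : List Int) :
    weak_compositions b n p = (weak_compositions b n []).map (fun t => p ++ t) := by
  exact wc_parent_aux b.toNat b le_rfl n p

-- [0,1,...,n] mapped through i ↦ n - i is the countdown list [n,...,0]
theorem map_sub_pyRange_aux : ∀ (k : Nat) (a b : Int), (b - a).toNat ≤ k →
    (PySem.List.pyRange a b 1).map (fun i => (b - 1) - i) = pvDown (b - 1 - a) := by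
  intro k
  induction k with
  | zero =>
    intro a b hb
    have hab : b ≤ a := by omega
    rw [PySem.List.pyRange_one_eq_nil hab, pvDown]
    have : b - 1 - a < 0 := by omega
    simp [this]
  | succ k ih =>
    intro a b hb
    by_cases hab : a < b
    · rw [PySem.List.pyRange_one_cons hab, pvDown]
      have : ¬ b - 1 - a < 0 := by omega
      simp only [this, dif_neg, not_false_iff, List.map_cons]
      have := ih (a + 1) b (by omega)
      rw [this, show b - 1 - (a + 1) = b - 1 - a - 1 from by omega]
    · have hab' : b ≤ a := by omega
      rw [PySem.List.pyRange_one_eq_nil hab', pvDown]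
      have : b - 1 - a < 0 := by omega
      simp [this]

theorem map_sub_pyRange (n : Int) :
    (PySem.List.pyRange 0 (n + 1) 1).map (fun i => n - i) = pvDown n := by
  have h := map_sub_pyRange_aux (n + 1 - 0).toNat 0 (n + 1) le_rfl
  simpa using h

theorem pvDown_neg {m : Int} (h : m < 0) : pvDown m = [] := by
  rw [pvDown]; simp [h]

theorem pvDown_cons {m : Int} (h : 0 ≤ m) : pvDown m = m :: pvDown (m - 1) := by
  rw [pvDown]; simp [show ¬ m < 0 by omega]

-- filtering a countdown by (· ≤ c) caps it at min
theorem down_flatMap_if : ∀ (k : Nat) (n : Int), n.toNat ≤ k → ∀ (c : Int) (f : Int → List (List Int)),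
    (pvDown n).flatMap (fun v => if v ≤ c then f v else []) = (pvDown (min n c)).flatMap f := by
  intro k
  induction k with
  | zero =>
    intro n hn c f
    by_cases h : n < 0
    · rw [pvDown_neg h, pvDown_neg (show min n c < 0 by omega)]; rfl
    · have hn0 : n = 0 := by omega
      subst hn0
      by_cases hc : (0 : Int) ≤ c
      · rw [show min (0 : Int) c = 0 by omega, pvDown_cons le_rfl,
            pvDown_neg (show (0 : Int) - 1 < 0 by omega)]
        simp [hc]
      · rw [show min (0 : Int) c = c by omega, pvDown_cons le_rfl,
            pvDown_neg (show (0 : Int) - 1 < 0 by omega), pvDown_neg (show c < 0 by omega)]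
        simp [hc]
  | succ k ih =>
    intro n hn c f
    by_cases h : n < 0
    · rw [pvDown_neg h, pvDown_neg (show min n c < 0 by omega)]; rfl
    · rw [pvDown_cons (show (0:Int) ≤ n by omega), List.flatMap_cons, ih (n - 1) (by omega) c f]
      by_cases hc : n ≤ c
      · rw [show min n c = n by omega, show min (n - 1) c = n - 1 by omega,
            pvDown_cons (show (0:Int) ≤ n by omega), List.flatMap_cons]
        simp [hc]
      · rw [show min n c = c by omega, show min (n - 1) c = c by omega]
        simp [hc]

-- core equivalence: filtering all weak compositions by the caps = direct pruned generation
theorem core : ∀ (rest : List Int) (c : Int) (n : Int),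
    (weak_compositions ((c :: rest).length : Int) n []).filter (fun e => is_admissible e (c :: rest))
      = genAdm (c :: rest) n := by
  intro rest
  induction rest with
  | nil =>
    intro c n
    rw [weak_compositions]
    have h1 : ¬ (([c].length : Int) > 1) := by simp
    rw [if_neg h1, genAdm]
    by_cases h : n ≤ c
    · simp [is_admissible, is_admissible_loop, h, show ¬ n > c by omega]
    · simp [is_admissible, is_admissible_loop, show n > c by omega, h]
  | cons c2 rs ih =>
    intro c n
    rw [weak_compositions]
    have hb : (((c :: c2 :: rs).length : Int)) > 1 := by
      simp only [List.length_cons]; push_cast; omega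
    rw [if_pos hb, genAdm, PySem.List.foldl_append_eq_flatMap]
    have hlen : ((c :: c2 :: rs).length : Int) - 1 = ((c2 :: rs).length : Int) := by
      simp only [List.length_cons]; push_cast; ring
    have step1 : ((PySem.List.pyRange 0 (n + 1) 1).flatMap
          (fun i => weak_compositions (((c :: c2 :: rs).length : Int) - 1) i ([] ++ [n - i]))).filter
            (fun e => is_admissible e (c :: c2 :: rs))
        = (PySem.List.pyRange 0 (n + 1) 1).flatMap
            (fun i => if n - i ≤ c then
                (genAdm (c2 :: rs) i).map (fun t => (n - i) :: t) else []) := by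
      rw [List.filter_flatMap]
      refine List.flatMap_congr (fun i _ => ?_)
      rw [hlen, wc_parent]
      simp only [List.nil_append, List.singleton_append, List.filter_map]
      have hadm : ∀ t : List Int, is_admissible ((n - i) :: t) (c :: c2 :: rs)
          = ((!decide (n - i > c)) && is_admissible t (c2 :: rs)) := by
        intro t
        simp [is_admissible, is_admissible_loop]
      by_cases h : n - i ≤ c
      · rw [if_pos h, ← ih c2 i]
        congr 1
        refine List.filter_congr (fun t _ => ?_)
        simp only [Function.comp]
        rw [hadm t]
        simp [show ¬ n - i > c by omega]
      · rw [if_neg h]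
        have hnil : (weak_compositions ((c2 :: rs).length : Int) i []).filter
            ((fun e => is_admissible e (c :: c2 :: rs)) ∘ (fun t => (n - i) :: t)) = [] := by
          refine List.filter_eq_nil_iff.mpr (fun t _ => ?_)
          simp only [Function.comp_apply, hadm t]
          simp [show n - i > c by omega]
        rw [hnil, List.map_nil]
    rw [step1]
    have step2 : (PySem.List.pyRange 0 (n + 1) 1).flatMap
          (fun i => if n - i ≤ c then (genAdm (c2 :: rs) i).map (fun t => (n - i) :: t) else [])
        = ((PySem.List.pyRange 0 (n + 1) 1).map (fun i => n - i)).flatMap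
            (fun v => if v ≤ c then (genAdm (c2 :: rs) (n - v)).map (fun t => v :: t) else []) := by
      rw [List.flatMap_map]
      refine List.flatMap_congr (fun i _ => ?_)
      by_cases h : n - i ≤ c
      · rw [if_pos h, if_pos h, show n - (n - i) = i from by ring]
      · rw [if_neg h, if_neg h]
    rw [step2, map_sub_pyRange, down_flatMap_if n.toNat n le_rfl c, ← min_def, List.nil_append]

-- every generated composition has one entry per cluster
theorem genAdm_length : ∀ (caps : List Int) (n : Int) (t : List Int), t ∈ genAdm caps n → t.length = caps.length := by
  intro caps
  induction caps with
  | nil => intro n t ht; rw [genAdm] at ht; simp at ht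
  | cons c rest ih =>
    cases rest with
    | nil =>
      intro n t ht
      rw [genAdm] at ht
      by_cases h : n ≤ c
      · rw [if_pos h] at ht; simp at ht; simp [ht]
      · rw [if_neg h] at ht; simp at ht
    | cons c2 rs =>
      intro n t ht
      rw [genAdm, PySem.List.foldl_append_eq_flatMap, List.nil_append] at ht
      simp only [List.mem_flatMap, List.mem_map] at ht
      obtain ⟨v, _, t', ht', rfl⟩ := ht
      have := ih (n - v) t' ht'
      simp [this]

-- ===== VERDICT (by name: the statement is the Claim_ definition above) =====
theorem paired_eq (caps t : List Int) (h : t.length = caps.length) :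
    paired_query_constraint t = pairedAltTest ((caps.length / 2 : Nat) : Int) t := by
  rw [paired_query_constraint, pairedAltTest, h]

theorem generate_admissible_weak_compositions_spec : Claim_equal_generate_admissible_weak_compositions := by
  intro caps n pc _ hpre
  unfold Spec_generate_admissible_weak_compositions
  unfold Pre_generate_admissible_weak_compositions at hpre
  obtain ⟨c, rest, rfl⟩ : ∃ c rest, caps = c :: rest := by
    cases caps with
    | nil => exact absurd rfl hpre
    | cons c rest => exact ⟨c, rest, rfl⟩
  unfold generate_admissible_weak_compositions generate_admissible_weak_compositions_alt
  cases pc with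
  | false =>
    simp only [Bool.not_false, if_true, if_false, Bool.false_eq_true]
    rw [PySem.List.foldl_append_if_eq_filter, List.nil_append, core]
  | true =>
    simp only [Bool.not_true, if_false, if_true, Bool.false_eq_true]
    rw [PySem.List.foldl_append_if_eq_filter, List.nil_append]
    have hsplit : (weak_compositions ((c :: rest).length : Int) n []).filter
          (fun el => is_admissible el (c :: rest) && paired_query_constraint el)
        = ((weak_compositions ((c :: rest).length : Int) n []).filter
            (fun el => is_admissible el (c :: rest))).filter (fun el => paired_query_constraint el) := by
      rw [List.filter_filter]
      exact List.filter_congr (fun t _ => Bool.and_comm _ _)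
    rw [hsplit, core]
    refine List.filter_congr (fun t ht => ?_)
    exact paired_eq (c :: rest) t (genAdm_length (c :: rest) n t ht)
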